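-- pv_equiv track=rewrite | github.com/ywallis/aoc | 2025/python/03.py | find_highest_combo
-- ===== SOURCE A (Python) =====
-- def find_highest_combo(line: int) -> int:
--     highest_first_digit = 0
--     highest_first_digit_idx = 0
--     highest_second_digit = 0
--     for i, n in enumerate(str(line)[:-1]):
--         if int(n) > highest_first_digit:
--             highest_first_digit = int(n)
--             highest_first_digit_idx = i
--     for i, n in enumerate(str(line)[highest_first_digit_idx + 1 :]):
--         if int(n) > highest_second_digit:
--             highest_second_digit = int(n)
--
--     return int(str(highest_first_digit) + str(highest_second_digit))
-- ===== SOURCE B (Python) =====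
-- def find_highest_combo(line: int) -> int:
--     s = str(line)
--     best_first = 0
--     idx = 0
--     best_second = 0
--     for i, c in enumerate(s):
--         d = int(c)
--         if i < len(s) - 1 and d > best_first:
--             best_first = d
--             idx = i
--             best_second = 0
--         elif i > idx:
--             if d > best_second:
--                 best_second = d
--     return best_first * 10 + best_second
-- ===== Notes on version B (the rewrite author's own statement) =====
-- stated objective: alternative
-- what changed: Replaces A's two sequential scans (find max over s[:-1], then rescan the suffix after its index) by one pass over enumerate(str(line)) that maintains the running first max, its index, and the best later digit with a reset-on-new-max, and builds the result arithmetically (10*first+second) instead of via string concatenation and int().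
import Mathlib
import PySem

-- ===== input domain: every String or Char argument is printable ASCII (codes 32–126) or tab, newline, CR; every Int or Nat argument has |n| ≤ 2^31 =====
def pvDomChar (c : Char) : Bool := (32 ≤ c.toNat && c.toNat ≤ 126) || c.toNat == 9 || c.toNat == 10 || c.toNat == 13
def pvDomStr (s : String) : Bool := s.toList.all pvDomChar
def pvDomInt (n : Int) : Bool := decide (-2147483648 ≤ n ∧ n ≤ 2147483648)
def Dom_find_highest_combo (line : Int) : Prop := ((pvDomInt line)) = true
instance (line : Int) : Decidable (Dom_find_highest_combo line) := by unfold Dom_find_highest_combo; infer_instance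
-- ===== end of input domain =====

-- B replaces A's two sequential scans by one pass maintaining (first max, its index, best later digit)
-- with reset-on-new-max, and combines the two digits arithmetically instead of via string concatenation.

-- ===== PORT A =====
-- int(n) on a one-character string is PySem.Int.ofChars? [n]; the ValueError case (non-digit char,
-- i.e. the '-' of a negative line) is excluded by Pre_, so .getD 0 is never taken on admitted inputs.
def find_highest_combo (line : Int) : Int :=
  let s := PySem.Int.toStr line
  let st1 := (PySem.List.enumerate (PySem.List.slice s.toList none (some (-1)))).foldl
      (fun (st : Int × Int) p =>
        if (PySem.Int.ofChars? [p.2]).getD 0 > st.1 then ((PySem.Int.ofChars? [p.2]).getD 0, p.1)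
        else st) (0, 0)
  let highest_second_digit := (PySem.List.enumerate (PySem.List.slice s.toList (some (st1.2 + 1)) none)).foldl
      (fun (st : Int) p =>
        if (PySem.Int.ofChars? [p.2]).getD 0 > st then (PySem.Int.ofChars? [p.2]).getD 0
        else st) 0
  (PySem.Int.ofStr? (PySem.Int.toStr st1.1 ++ PySem.Int.toStr highest_second_digit)).getD 0

-- ===== PORT B =====
def find_highest_combo_alt (line : Int) : Int :=
  let s := PySem.Int.toStr line
  let n := PySem.Str.len s
  let st := (PySem.List.enumerate s.toList).foldl
      (fun (st : Int × Int × Int) p =>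
        let d := (PySem.Int.ofChars? [p.2]).getD 0
        if p.1 < n - 1 ∧ d > st.1 then (d, p.1, 0)
        else if p.1 > st.2.1 then (st.1, st.2.1, if d > st.2.2 then d else st.2.2)
        else st) (0, 0, 0)
  st.1 * 10 + st.2.2

-- ===== PRECONDITION & SPEC =====
-- Python A raises ValueError on negative line (int('-') on the sign character); so does B.
def Pre_find_highest_combo (line : Int) : Prop := 0 ≤ line
instance (line : Int) : Decidable (Pre_find_highest_combo line) := by unfold Pre_find_highest_combo; infer_instance
def pvWitness_find_highest_combo : Int := (907)

def Spec_find_highest_combo (line : Int) (out : Int) : Prop := out = find_highest_combo_alt line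
instance (line : Int) (out : Int) : Decidable (Spec_find_highest_combo line out) := by unfold Spec_find_highest_combo; infer_instance

-- ===== CLAIM (what is proved, stated in full; the proofs are below) =====
def Claim_equal_find_highest_combo : Prop := ∀ (line : Int), Dom_find_highest_combo line → Pre_find_highest_combo line → Spec_find_highest_combo line (find_highest_combo line)

-- ===== LEMMAS AND PROOFS =====

-- the integer value A's and B's ports take for int(c) on a one-character string
def pvV (c : Char) : Int := (PySem.Int.ofChars? [c]).getD 0
-- A's first loop body, A's second loop body (index dropped), and B's loop body over the prefix s[:-1]
def pvStep1 (st : Int × Int) (p : Int × Char) : Int × Int :=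
  if pvV p.2 > st.1 then (pvV p.2, p.1) else st
def pvStep2 (a : Int) (c : Char) : Int := if pvV c > a then pvV c else a
def pvStepB' (st : Int × Int × Int) (p : Int × Char) : Int × Int × Int :=
  if pvV p.2 > st.1 then (pvV p.2, p.1, 0)
  else if p.1 > st.2.1 then (st.1, st.2.1, pvStep2 st.2.2 p.2) else st

theorem pvV_digitChar (d : Nat) (hd : d < 10) : 0 ≤ pvV (Nat.digitChar d) ∧ pvV (Nat.digitChar d) ≤ 9 := by
  interval_cases d <;> decide

theorem mem_toDigitsCore (f : Nat) : ∀ (n : Nat) (acc : List Char) (c : Char),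
    c ∈ Nat.toDigitsCore 10 f n acc → c ∈ acc ∨ ∃ d, d < 10 ∧ c = Nat.digitChar d := by
  induction f with
  | zero => intro n acc c h; exact Or.inl h
  | succ f ih =>
    intro n acc c h
    simp only [Nat.toDigitsCore] at h
    by_cases h10 : n / 10 = 0
    · simp only [h10, if_true] at h
      rcases List.mem_cons.mp h with h | h
      · exact Or.inr ⟨n % 10, Nat.mod_lt _ (by norm_num), h⟩
      · exact Or.inl h
    · simp only [h10, if_false] at h
      rcases ih (n / 10) _ c h with h | h
      · rcases List.mem_cons.mp h with h | h
        · exact Or.inr ⟨n % 10, Nat.mod_lt _ (by norm_num), h⟩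
        · exact Or.inl h
      · exact Or.inr h

theorem pvV_bound_of_mem_toDigits (m : Nat) (c : Char) (hc : c ∈ Nat.toDigits 10 m) :
    0 ≤ pvV c ∧ pvV c ≤ 9 := by
  rcases mem_toDigitsCore (m + 1) m [] c hc with h | ⟨d, hd, rfl⟩
  · simp at h
  · exact pvV_digitChar d hd

theorem length_toDigitsCore_le (f : Nat) : ∀ (n : Nat) (acc : List Char),
    acc.length ≤ (Nat.toDigitsCore 10 f n acc).length := by
  induction f with
  | zero => intro n acc; simp [Nat.toDigitsCore]
  | succ f ih =>
    intro n acc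
    simp only [Nat.toDigitsCore]
    by_cases h10 : n / 10 = 0
    · simp [h10]
    · simp only [h10, if_false]
      calc acc.length ≤ acc.length + 1 := Nat.le_succ _
        _ = ((n % 10).digitChar :: acc).length := rfl
        _ ≤ _ := ih _ _

theorem toDigits_ne_nil (m : Nat) : Nat.toDigits 10 m ≠ [] := by
  intro h
  have h1 : 1 ≤ (Nat.toDigits 10 m).length := by
    show 1 ≤ (Nat.toDigitsCore 10 (m + 1) m []).length
    simp only [Nat.toDigitsCore]
    by_cases h10 : m / 10 = 0
    · simp [h10]
    · simp only [h10, if_false]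
      calc 1 = ([(m % 10).digitChar] : List Char).length := rfl
        _ ≤ _ := length_toDigitsCore_le _ _ _
  rw [h] at h1; simp at h1

-- folding A's second loop over an enumerate is folding pvStep2 over the list itself
theorem foldl_enumerate_snd (xs : List Char) : ∀ (s : Int) (init : Int),
    (PySem.List.enumerate xs s).foldl
        (fun (st : Int) p =>
          if (PySem.Int.ofChars? [p.2]).getD 0 > st then (PySem.Int.ofChars? [p.2]).getD 0 else st)
        init
      = xs.foldl pvStep2 init := by
  induction xs with
  | nil => intro s init; simp [PySem.List.enumerate_nil]
  | cons x xs ih =>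
    intro s init
    simp only [PySem.List.enumerate_cons, List.foldl_cons, ih]
    rfl

theorem foldl_pvStep2_nonneg (xs : List Char) : ∀ (init : Int), 0 ≤ init → 0 ≤ xs.foldl pvStep2 init := by
  induction xs with
  | nil => intro init h; simpa using h
  | cons x xs ih =>
    intro init h
    simp only [List.foldl_cons]
    apply ih
    unfold pvStep2
    split_ifs with hv
    · omega
    · exact h

theorem foldl_pvStep2_le (xs : List Char) (hb : ∀ c ∈ xs, pvV c ≤ 9) :
    ∀ (init : Int), init ≤ 9 → xs.foldl pvStep2 init ≤ 9 := by
  induction xs with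
  | nil => intro init h; simpa using h
  | cons x xs ih =>
    intro init h
    simp only [List.foldl_cons]
    apply ih (fun c hc => hb c (List.mem_cons_of_mem _ hc))
    unfold pvStep2
    split_ifs with hv
    · exact hb x (List.mem_cons_self)
    · exact h

theorem foldl_pvStep1_bound (L : List (Int × Char)) (hb : ∀ p ∈ L, pvV p.2 ≤ 9) :
    ∀ (init : Int × Int), 0 ≤ init.1 → init.1 ≤ 9 →
      0 ≤ (L.foldl pvStep1 init).1 ∧ (L.foldl pvStep1 init).1 ≤ 9 := by
  induction L with
  | nil => intro init h0 h9; exact ⟨h0, h9⟩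
  | cons p L ih =>
    intro init h0 h9
    simp only [List.foldl_cons]
    apply ih (fun q hq => hb q (List.mem_cons_of_mem _ hq))
    · unfold pvStep1; split_ifs with hv
      · have := hb p (List.mem_cons_self); omega
      · exact h0
    · unfold pvStep1; split_ifs with hv
      · exact hb p (List.mem_cons_self)
      · exact h9

-- combining two single digits by str-concat + int() is base-10 arithmetic
theorem pvCombine (a b : Int) (ha0 : 0 ≤ a) (ha9 : a ≤ 9) (hb0 : 0 ≤ b) (hb9 : b ≤ 9) :
    (PySem.Int.ofStr? (PySem.Int.toStr a ++ PySem.Int.toStr b)).getD 0 = a * 10 + b := by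
  interval_cases a <;> interval_cases b <;> decide

-- the single-pass invariant: over any prefix (where B's "i < len-1" test holds), B's state is
-- A's first-loop state together with the running max of the digits strictly after its index
theorem pvMain (t : List Char) :
    ((PySem.List.enumerate t).foldl pvStepB' (0, 0, 0)).1 = ((PySem.List.enumerate t).foldl pvStep1 (0, 0)).1 ∧
    ((PySem.List.enumerate t).foldl pvStepB' (0, 0, 0)).2.1 = ((PySem.List.enumerate t).foldl pvStep1 (0, 0)).2 ∧
    ((PySem.List.enumerate t).foldl pvStepB' (0, 0, 0)).2.2
      = (t.drop (((PySem.List.enumerate t).foldl pvStep1 (0, 0)).2.toNat + 1)).foldl pvStep2 0 ∧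
    0 ≤ ((PySem.List.enumerate t).foldl pvStep1 (0, 0)).2 ∧
    (t = [] → (PySem.List.enumerate t).foldl pvStep1 (0, 0) = (0, 0)) ∧
    (t ≠ [] → ((PySem.List.enumerate t).foldl pvStep1 (0, 0)).2.toNat < t.length) := by
  induction t using List.reverseRecOn with
  | nil => simp [PySem.List.enumerate_nil]
  | append_singleton t z ih =>
    obtain ⟨ih1, ih2, ih3, ihpos, ihnil, ihlt⟩ := ih
    have henum : PySem.List.enumerate (t ++ [z]) 0
        = PySem.List.enumerate t 0 ++ [((t.length : Int), z)] := by
      rw [PySem.List.enumerate_append]; simp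
    set stB := (PySem.List.enumerate t).foldl pvStepB' (0, 0, 0) with hstB
    set stA := (PySem.List.enumerate t).foldl pvStep1 (0, 0) with hstA
    rw [henum]
    simp only [List.foldl_append, List.foldl_cons, List.foldl_nil]
    rw [← hstB, ← hstA]
    by_cases hgt : pvV z > stA.1
    · -- new first max at the last processed position: reset the second max
      have hB : pvStepB' stB ((t.length : Int), z) = (pvV z, (t.length : Int), 0) := by
        unfold pvStepB'; rw [ih1]; simp [hgt]
      have hA : pvStep1 stA ((t.length : Int), z) = (pvV z, (t.length : Int)) := by
        unfold pvStep1; simp [hgt]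
      rw [hB, hA]
      refine ⟨rfl, rfl, ?_, by positivity, by simp, fun _ => by simp⟩
      rw [List.drop_eq_nil_of_le (by simp)]
      rfl
    · have hB1 : pvStepB' stB ((t.length : Int), z)
          = if (t.length : Int) > stB.2.1 then (stB.1, stB.2.1, pvStep2 stB.2.2 z) else stB := by
        unfold pvStepB'; rw [ih1]; simp [hgt]
      have hA : pvStep1 stA ((t.length : Int), z) = stA := by
        unfold pvStep1; simp [hgt]
      rw [hA]
      rcases List.eq_nil_or_concat' t with rfl | ⟨t', z', rfl⟩
      · -- t = []: the single element has index 0, no branch fires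
        have h0 : stA = (0, 0) := ihnil rfl
        have hB0 : stB = (0, 0, 0) := by simp [hstB, PySem.List.enumerate_nil]
        rw [hB1, hB0, h0]
        norm_num
      · -- t ≠ []: the first-max index is strictly inside t, so the last element feeds the second max
        have hne : t' ++ [z'] ≠ [] := by simp
        have hlt := ihlt hne
        have hgt' : (((t' ++ [z']).length : Int)) > stA.2 := by
          have h := Int.toNat_of_nonneg ihpos
          omega
        rw [hB1, ih2, if_pos hgt', ih1, ih3]
        have hdrop : (t' ++ [z'] ++ [z]).drop (stA.2.toNat + 1)
            = (t' ++ [z']).drop (stA.2.toNat + 1) ++ [z] := by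
          rw [List.drop_append_of_le_length (by omega)]
        refine ⟨rfl, rfl, ?_, ihpos, by simp, fun _ => by
          simp only [List.length_append, List.length_cons, List.length_nil] at hlt ⊢
          omega⟩
        rw [hdrop, List.foldl_append]
        rfl

-- A's whole computation and B's whole computation agree on any nonempty list of bounded chars
set_option maxHeartbeats 1600000 in
theorem pvPorts_eq (line : Int) (hline : 0 ≤ line) :
    find_highest_combo line = find_highest_combo_alt line := by
  have hl : (PySem.Int.toStr line).toList = Nat.toDigits 10 line.toNat := by
    rw [PySem.Int.toList_toStr]
    unfold PySem.Int.toChars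
    rw [if_neg (by omega)]
  have hne : (PySem.Int.toStr line).toList ≠ [] := by rw [hl]; exact toDigits_ne_nil _
  have hbnd : ∀ c ∈ (PySem.Int.toStr line).toList, 0 ≤ pvV c ∧ pvV c ≤ 9 := by
    intro c hc; rw [hl] at hc; exact pvV_bound_of_mem_toDigits _ _ hc
  -- split off the last character
  rcases List.eq_nil_or_concat' ((PySem.Int.toStr line).toList) with h | ⟨t, z, hlz⟩
  · exact absurd h hne
  rw [hlz] at hbnd
  unfold find_highest_combo find_highest_combo_alt
  simp only [PySem.Str.len_eq]
  simp only [hlz]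
  rw [PySem.List.slice_to_neg_one, List.dropLast_concat]
  have henum : PySem.List.enumerate (t ++ [z]) 0
      = PySem.List.enumerate t 0 ++ [((t.length : Int), z)] := by
    rw [PySem.List.enumerate_append]; simp
  -- B's fold over the prefix uses pvStepB', since every prefix index is < len - 1
  have hcongr : (PySem.List.enumerate t).foldl
      (fun (st : Int × Int × Int) p =>
        if p.1 < ((t ++ [z]).length : Int) - 1 ∧ (PySem.Int.ofChars? [p.2]).getD 0 > st.1
        then ((PySem.Int.ofChars? [p.2]).getD 0, p.1, 0)
        else if p.1 > st.2.1 then (st.1, st.2.1,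
          if (PySem.Int.ofChars? [p.2]).getD 0 > st.2.2 then (PySem.Int.ofChars? [p.2]).getD 0 else st.2.2)
        else st) (0, 0, 0)
      = (PySem.List.enumerate t).foldl pvStepB' (0, 0, 0) := by
    apply PySem.List.foldl_congr_mem
    intro st p hp
    rcases (PySem.List.mem_enumerate_iff _ _ _).mp hp with ⟨k, hk, rfl⟩
    have hklt : ((0 : Int) + k) < ((t ++ [z]).length : Int) - 1 := by
      simp only [List.length_append, List.length_cons, List.length_nil]
      push_cast
      omega
    unfold pvStepB' pvStep2 pvV
    simp only [hklt, true_and]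
  -- reduce A's first loop to the pvStep1 fold
  have hAfold : (PySem.List.enumerate t).foldl
      (fun (st : Int × Int) p =>
        if (PySem.Int.ofChars? [p.2]).getD 0 > st.1 then ((PySem.Int.ofChars? [p.2]).getD 0, p.1)
        else st) (0, 0) = (PySem.List.enumerate t).foldl pvStep1 (0, 0) := rfl
  rw [hAfold, henum, List.foldl_append, List.foldl_cons, List.foldl_nil, hcongr]
  obtain ⟨m1, m2, m3, mpos, -, mlt⟩ := pvMain t
  -- the last element of B's pass: index = len - 1, B's first branch cannot fire
  have hlast : ¬ (((t.length : Int)) < ((t ++ [z]).length : Int) - 1) := by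
    simp only [List.length_append, List.length_cons, List.length_nil]
    push_cast
    omega
  simp only [hlast, false_and, if_false]
  -- A's second loop, as a pvStep2 fold over the dropped suffix of the list
  have hslice : PySem.List.slice (t ++ [z])
        (some (((PySem.List.enumerate t).foldl pvStep1 (0, 0)).2 + 1)) none
      = (t ++ [z]).drop (((PySem.List.enumerate t).foldl pvStep1 (0, 0)).2.toNat + 1) := by
    have hpos1 : (0 : Int) ≤ ((PySem.List.enumerate t).foldl pvStep1 (0, 0)).2 + 1 := by omega
    rw [PySem.List.slice_from _ hpos1]
    congr 1
    omega
  rw [hslice, foldl_enumerate_snd]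
  -- bounds for the final combine
  have hbt : ∀ p ∈ PySem.List.enumerate t 0, pvV p.2 ≤ 9 := by
    intro p hp
    rcases (PySem.List.mem_enumerate_iff _ _ _).mp hp with ⟨k, hk, rfl⟩
    exact (hbnd _ (List.mem_append_left _ (List.getElem_mem hk))).2
  have hA1bnd := foldl_pvStep1_bound (PySem.List.enumerate t 0) hbt (0, 0) le_rfl (by norm_num)
  have hzbnd : 0 ≤ pvV z ∧ pvV z ≤ 9 := hbnd z (List.mem_append_right _ (by simp))
  rcases List.eq_nil_or_concat' t with rfl | ⟨t', z', rfl⟩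
  · -- single-character line: both sides are 0
    simp only [PySem.List.enumerate_nil, List.foldl_nil, List.nil_append]
    norm_num
    exact pvCombine 0 0 le_rfl (by norm_num) le_rfl (by norm_num)
  · -- at least two characters: the last one feeds the second max in both versions
    have hne' : t' ++ [z'] ≠ [] := by simp
    have hlt := mlt hne'
    have hcond : (((t' ++ [z']).length : Int)) > ((PySem.List.enumerate (t' ++ [z'])).foldl pvStep1 (0, 0)).2 := by
      have h := Int.toNat_of_nonneg mpos
      omega
    rw [m2, if_pos hcond, m1, m3]
    have hdrop : (t' ++ [z'] ++ [z]).drop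
          ((((PySem.List.enumerate (t' ++ [z'])).foldl pvStep1 (0, 0)).2.toNat + 1))
        = (t' ++ [z']).drop ((((PySem.List.enumerate (t' ++ [z'])).foldl pvStep1 (0, 0)).2.toNat + 1)) ++ [z] := by
      rw [List.drop_append_of_le_length (by omega)]
    rw [hdrop, List.foldl_append]
    -- bounds, then the digit-combination identity
    have hb2 : ∀ c ∈ (t' ++ [z']).drop ((((PySem.List.enumerate (t' ++ [z'])).foldl pvStep1 (0, 0)).2.toNat + 1)), pvV c ≤ 9 := by
      intro c hc
      exact (hbnd c (List.mem_append_left _ (List.mem_of_mem_drop hc))).2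
    have hS0 : 0 ≤ pvStep2 (((t' ++ [z']).drop ((((PySem.List.enumerate (t' ++ [z'])).foldl pvStep1 (0, 0)).2.toNat + 1))).foldl pvStep2 0) z := by
      unfold pvStep2; split_ifs with h
      · omega
      · exact foldl_pvStep2_nonneg _ 0 le_rfl
    have hS9 : pvStep2 (((t' ++ [z']).drop ((((PySem.List.enumerate (t' ++ [z'])).foldl pvStep1 (0, 0)).2.toNat + 1))).foldl pvStep2 0) z ≤ 9 := by
      unfold pvStep2; split_ifs with h
      · exact hzbnd.2
      · exact foldl_pvStep2_le _ hb2 0 (by norm_num)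
    exact pvCombine _ _ hA1bnd.1 hA1bnd.2 hS0 hS9

-- ===== VERDICT (by name: the statement is the Claim_ definition above) =====
theorem find_highest_combo_spec : Claim_equal_find_highest_combo := by
  intro line _ hpre
  unfold Spec_find_highest_combo
  exact pvPorts_eq line hpre
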